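-- pv_equiv track=rewrite | github.com/reach950/data-structure-algorithm-in-python | 数据结构与算法之美/dynamic_programming.py | find_sub_max_length
-- ===== SOURCE A (Python) =====
-- def find_sub_max_length(test_list):
--     size = len(test_list)
--     max_length_list = [1 for _ in range(size)]
--     for i in range(1, size):
--         for j in reversed(range(0, i)):
--             # 小于test_list[i]的最长子序列长度
--             max_i_length = 1
--             if test_list[i] > test_list[j]:
--                 max_i_length = 1 + max_length_list[j]
--                 break
--         max_length_list[i] = max(max_length_list[i-1], max_i_length)
--     return max_length_list[size - 1]
-- ===== SOURCE B (Python) =====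
-- def find_sub_max_length(test_list):
--     # Monotonic stack of (value, dp) pairs: values strictly increasing bottom-to-top
--     # give the nearest previous smaller element in O(1) amortized; single DP pass.
--     stack = []
--     dp = None
--     for x in test_list:
--         while stack and stack[-1][0] >= x:
--             stack.pop()
--         cand = (1 + stack[-1][1]) if stack else 1
--         dp = cand if dp is None else max(dp, cand)
--         stack.append((x, dp))
--     return dp
-- ===== Notes on version B (the rewrite author's own statement) =====
-- stated objective: faster
-- what changed: Replaced the inner backwards scan for the nearest previous smaller element by a monotonic stack carrying (value, dp) pairs, turning the nested loops into a single amortized O(n) pass.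
import Mathlib
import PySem

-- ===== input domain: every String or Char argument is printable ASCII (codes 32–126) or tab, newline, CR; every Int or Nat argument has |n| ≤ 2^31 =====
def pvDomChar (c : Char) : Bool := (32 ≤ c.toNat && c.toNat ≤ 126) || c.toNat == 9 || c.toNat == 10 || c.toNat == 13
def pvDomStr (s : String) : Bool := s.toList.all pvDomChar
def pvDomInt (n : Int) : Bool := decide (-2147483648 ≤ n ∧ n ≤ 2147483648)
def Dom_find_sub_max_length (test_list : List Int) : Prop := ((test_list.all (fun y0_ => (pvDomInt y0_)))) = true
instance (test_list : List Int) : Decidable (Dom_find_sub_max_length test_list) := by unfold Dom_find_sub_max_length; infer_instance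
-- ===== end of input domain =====

-- B replaces A's O(n^2) inner backwards scan by a monotonic stack of (value, dp) pairs: one amortized O(n) pass.

-- ===== PORT A =====
-- inner loop 'for j in reversed(range(0, i)): max_i_length = 1; if test_list[i] > test_list[j]: … break'
def pvAInner (a ml : List Int) (ai : Int) : List Int → Int
  | [] => 1
  | j :: js =>
    if PySem.List.pyGetD a j 0 < ai then 1 + PySem.List.pyGetD ml j 0
    else pvAInner a ml ai js

-- one iteration of the outer loop: max_length_list[i] = max(max_length_list[i-1], max_i_length)
def pvAStep (a : List Int) (ml : List Int) (i : Int) : List Int :=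
  PySem.List.pySetD ml i
    (max (PySem.List.pyGetD ml (i - 1) 0)
         (pvAInner a ml (PySem.List.pyGetD a i 0) ((PySem.List.pyRange 0 i 1).reverse)))

def find_sub_max_length (test_list : List Int) : Int :=
  let size := test_list.length
  let ml0 := List.replicate size (1 : Int)
  let ml := (PySem.List.pyRange 1 (size : Int) 1).foldl (pvAStep test_list) ml0
  PySem.List.pyGetD ml ((size : Int) - 1) 0

-- ===== PORT B =====
-- 'while stack and stack[-1][0] >= x: stack.pop()'  (stack top = list head here)
def pvPop (x : Int) : List (Int × Int) → List (Int × Int)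
  | [] => []
  | (v, d) :: rest => if x ≤ v then pvPop x rest else (v, d) :: rest

-- one iteration of B's single pass: state = (stack of (value, dp), dp so far as Option)
def pvBStep (st : List (Int × Int) × Option Int) (x : Int) : List (Int × Int) × Option Int :=
  let stack := pvPop x st.1
  let cand : Int :=
    match stack with
    | [] => 1
    | (_, d) :: _ => 1 + d
  let dp : Int :=
    match st.2 with
    | none => cand
    | some p => max p cand
  ((x, dp) :: stack, some dp)

def find_sub_max_length_alt (test_list : List Int) : Int :=
  match (test_list.foldl pvBStep ([], none)).2 with
  | none => 0   -- empty input: Python B returns None (outside Pre_)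
  | some d => d

-- ===== PRECONDITION & SPEC =====
-- Pre_ excludes only the empty list, on which A raises IndexError (max_length_list[-1] of []).
def Pre_find_sub_max_length (test_list : List Int) : Prop := test_list ≠ []
instance (test_list : List Int) : Decidable (Pre_find_sub_max_length test_list) := by
  unfold Pre_find_sub_max_length; infer_instance

def pvWitness_find_sub_max_length : List Int := [3, 1, 2]

def Spec_find_sub_max_length (test_list : List Int) (out : Int) : Prop := out = find_sub_max_length_alt test_list
instance (test_list : List Int) (out : Int) : Decidable (Spec_find_sub_max_length test_list out) := by unfold Spec_find_sub_max_length; infer_instance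

-- ===== CLAIM (what is proved, stated in full; the proofs are below) =====
def Claim_equal_find_sub_max_length : Prop := ∀ (test_list : List Int), Dom_find_sub_max_length test_list → Pre_find_sub_max_length test_list → Spec_find_sub_max_length test_list (find_sub_max_length test_list)

-- ===== LEMMAS AND PROOFS =====

-- Reference DP table shared by both proofs: entry k is A's max_length_list[k].
-- candidate value 1 + t[j] for the nearest j < k with a[j] < a[k] (1 if none)
def pvCand (a t : List Int) (k : Nat) : Int :=
  match ((List.range k).reverse).find? (fun j => decide (a.getD j 0 < a.getD k 0)) with
  | none => 1
  | some j => 1 + t.getD j 0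

def pvTab (a : List Int) : Nat → List Int
  | 0 => []
  | k+1 => pvTab a k ++ [max ((pvTab a k).getD (k-1) 0) (pvCand a (pvTab a k) k)]

def pvDp (a : List Int) (k : Nat) : Int := (pvTab a (k+1)).getD k 0

-- indices still on B's stack after processing a[0..k)
def pvIdx (a : List Int) : Nat → List Nat
  | 0 => []
  | k+1 => k :: (pvIdx a k).dropWhile (fun j => decide (a.getD k 0 ≤ a.getD j 0))

theorem pvTab_length (a : List Int) (m : Nat) : (pvTab a m).length = m := by
  induction m with
  | zero => rfl
  | succ k ih => simp [pvTab, ih]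

theorem getD_append_length (l : List Int) (e d : Int) : (l ++ [e]).getD l.length d = e := by
  simp [List.getD_eq_getElem?_getD]

theorem pvTab_getD (a : List Int) {j m : Nat} (h : j < m) : (pvTab a m).getD j 0 = pvDp a j := by
  induction m with
  | zero => omega
  | succ k ih =>
    rcases Nat.lt_or_ge j k with hj | hj
    · rw [pvTab, List.getD_append _ _ _ _ (by rw [pvTab_length]; exact hj), ih hj]
    · have hjk : j = k := by omega
      subst hjk
      rfl

theorem pvDp_eq (a : List Int) (k : Nat) :
    pvDp a k = max ((pvTab a k).getD (k-1) 0) (pvCand a (pvTab a k) k) := by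
  show (pvTab a (k+1)).getD k 0 = _
  rw [pvTab]
  have := getD_append_length (pvTab a k)
    (max ((pvTab a k).getD (k-1) 0) (pvCand a (pvTab a k) k)) 0
  rw [pvTab_length] at this
  exact this

-- ===== A side =====

theorem pvRange_cast (k : Nat) :
    PySem.List.pyRange 0 (k : Int) 1 = (List.range k).map (fun (j : Nat) => (j : Int)) := by
  rw [PySem.List.pyRange_one]
  simp only [sub_zero, Int.toNat_natCast, zero_add]

theorem pvAInner_eq (a ml : List Int) (ai : Int) (js : List Nat) :
    pvAInner a ml ai (js.map (fun (j : Nat) => (j : Int))) =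
      match js.find? (fun j => decide (a.getD j 0 < ai)) with
      | none => 1
      | some j => 1 + ml.getD j 0 := by
  induction js with
  | nil => rfl
  | cons j t ih =>
    simp only [List.map_cons, pvAInner, PySem.List.pyGetD_natCast, List.find?_cons]
    by_cases h : a.getD j 0 < ai
    · rw [if_pos h, decide_eq_true h]
    · rw [if_neg h, decide_eq_false h, ih]

theorem a_step (a : List Int) (k : Nat) (h1 : 1 ≤ k) (h2 : k < a.length) :
    pvAStep a (pvTab a k ++ List.replicate (a.length - k) 1) (k : Int) =
      pvTab a (k+1) ++ List.replicate (a.length - (k+1)) 1 := by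
  have hlen : (pvTab a k).length = k := pvTab_length a k
  have hk1 : ((k : Int) - 1) = ((k - 1 : Nat) : Int) := by omega
  unfold pvAStep
  have hml_getD : ∀ j < k,
      (pvTab a k ++ List.replicate (a.length - k) 1).getD j 0 = (pvTab a k).getD j 0 := by
    intro j hj
    exact List.getD_append _ _ _ _ (by rw [hlen]; exact hj)
  have hinner :
      pvAInner a (pvTab a k ++ List.replicate (a.length - k) 1)
        (PySem.List.pyGetD a (k : Int) 0) ((PySem.List.pyRange 0 (k : Int) 1).reverse) =
        pvCand a (pvTab a k) k := by
    rw [pvRange_cast, ← List.map_reverse, PySem.List.pyGetD_natCast, pvAInner_eq]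
    unfold pvCand
    cases hf : ((List.range k).reverse).find? (fun j => decide (a.getD j 0 < a.getD k 0)) with
    | none => rfl
    | some j =>
      have hj : j < k := by
        have := List.mem_of_find?_eq_some hf
        simp at this
        exact this
      simp only [hml_getD j hj]
  rw [hinner, hk1, PySem.List.pyGetD_natCast, hml_getD (k-1) (by omega),
    PySem.List.pySetD_natCast]
  have hrep : List.replicate (a.length - k) (1 : Int) =
      1 :: List.replicate (a.length - (k+1)) 1 := by
    have : a.length - k = (a.length - (k+1)) + 1 := by omega
    rw [this, List.replicate_succ]
  rw [hrep, List.set_append, if_neg (by omega)]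
  rw [hlen, Nat.sub_self, List.set_cons_zero]
  simp [pvTab]

theorem a_inv (a : List Int) : ∀ k, k ≤ a.length →
    (PySem.List.pyRange 1 (k : Int) 1).foldl (pvAStep a) (List.replicate a.length 1) =
      pvTab a k ++ List.replicate (a.length - k) 1 := by
  intro k
  induction k with
  | zero =>
    intro _
    rw [PySem.List.pyRange_one_eq_nil (by omega)]
    simp [pvTab]
  | succ k ih =>
    intro hk
    rcases Nat.eq_zero_or_pos k with hk0 | hk1
    · subst hk0
      have h1 : ((0 + 1 : Nat) : Int) = 1 := by norm_num
      rw [h1, PySem.List.pyRange_one_eq_nil (by omega)]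
      obtain ⟨m, hm⟩ : ∃ m, a.length = m + 1 := ⟨a.length - 1, by omega⟩
      rw [hm]
      simp [List.replicate_succ, pvTab, pvCand]
    · have hcast : ((k + 1 : Nat) : Int) = (k : Int) + 1 := by push_cast; ring
      rw [hcast, PySem.List.pyRange_one_succ_right (by exact_mod_cast hk1),
        List.foldl_append, ih (by omega)]
      simpa using a_step a k hk1 (by omega)

theorem a_result (a : List Int) (h : a ≠ []) :
    find_sub_max_length a = pvDp a (a.length - 1) := by
  have hn : 1 ≤ a.length := List.length_pos_iff.mpr h
  rw [show find_sub_max_length a =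
      PySem.List.pyGetD
        ((PySem.List.pyRange 1 (a.length : Int) 1).foldl (pvAStep a)
          (List.replicate a.length 1)) ((a.length : Int) - 1) 0 from rfl]
  rw [a_inv a a.length (le_refl _)]
  simp only [Nat.sub_self, List.replicate_zero, List.append_nil]
  have hk1 : ((a.length : Int) - 1) = ((a.length - 1 : Nat) : Int) := by omega
  rw [hk1, PySem.List.pyGetD_natCast, pvTab_getD a (by omega)]

-- ===== B side =====

theorem pvPop_map (a : List Int) (x : Int) (l : List Nat) :
    pvPop x (l.map (fun j => (a.getD j 0, pvDp a j))) =
      (l.dropWhile (fun j => decide (x ≤ a.getD j 0))).map (fun j => (a.getD j 0, pvDp a j)) := by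
  induction l with
  | nil => rfl
  | cons j t ih =>
    simp only [List.map_cons, pvPop, List.dropWhile_cons, decide_eq_true_eq]
    by_cases h : x ≤ a.getD j 0
    · rw [if_pos h, if_pos h, ih]
    · rw [if_neg h, if_neg h, List.map_cons]

theorem find?_dropWhile (p q : Nat → Bool) (l : List Nat) (h : ∀ j, q j = true → p j = false) :
    (l.dropWhile q).find? p = l.find? p := by
  induction l with
  | nil => rfl
  | cons j t ih =>
    by_cases hq : q j
    · rw [List.dropWhile_cons_of_pos hq, ih, List.find?_cons, h j hq]
    · rw [List.dropWhile_cons_of_neg hq]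

theorem pvIdx_find? (a : List Int) (x : Int) (k : Nat) :
    (pvIdx a k).find? (fun j => decide (a.getD j 0 < x)) =
      ((List.range k).reverse).find? (fun j => decide (a.getD j 0 < x)) := by
  induction k with
  | zero => rfl
  | succ k ih =>
    rw [List.range_succ, List.reverse_append]
    simp only [List.reverse_singleton, List.singleton_append]
    rw [pvIdx, List.find?_cons, List.find?_cons]
    by_cases h : a.getD k 0 < x
    · rw [decide_eq_true h]
    · rw [decide_eq_false h, ← ih]
      exact find?_dropWhile _ _ _ (by
        intro j hj
        simp only [decide_eq_true_eq] at hj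
        simp only [decide_eq_false_iff_not, not_lt]
        exact le_trans (le_of_not_gt h) hj)

theorem pvDp_zero (a : List Int) : pvDp a 0 = 1 := by
  simp [pvDp, pvTab, pvCand]

theorem b_inv (a : List Int) : ∀ k, k ≤ a.length →
    (a.take k).foldl pvBStep ([], none) =
      ((pvIdx a k).map (fun j => (a.getD j 0, pvDp a j)),
        if k = 0 then none else some (pvDp a (k-1))) := by
  intro k
  induction k with
  | zero => intro _; rfl
  | succ k ih =>
    intro hk
    have hklt : k < a.length := by omega
    have hget : a.getD k 0 = a[k] := by
      simp [List.getD_eq_getElem?_getD, List.getElem?_eq_getElem hklt]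
    rw [List.take_add_one, List.getElem?_eq_getElem hklt]
    simp only [Option.toList_some]
    rw [List.foldl_append, ih (by omega)]
    simp only [List.foldl_cons, List.foldl_nil]
    unfold pvBStep
    simp only [← hget]
    rw [pvPop_map]
    have hcand :
        (match ((pvIdx a k).dropWhile (fun j => decide (a.getD k 0 ≤ a.getD j 0))).map
            (fun j => (a.getD j 0, pvDp a j)) with
          | [] => (1 : Int)
          | (_, d) :: _ => 1 + d) = pvCand a (pvTab a k) k := by
      have hdw : (fun (j : Nat) => decide (a.getD k 0 ≤ a.getD j 0)) =
          (fun (j : Nat) => !decide (a.getD j 0 < a.getD k 0)) := by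
        funext j
        rw [← decide_not]
        exact decide_eq_decide.mpr not_lt.symm
      have hh : ((pvIdx a k).dropWhile (fun j => decide (a.getD k 0 ≤ a.getD j 0))).head? =
          ((List.range k).reverse).find? (fun j => decide (a.getD j 0 < a.getD k 0)) := by
        rw [hdw, ← List.find?_eq_head?_dropWhile_not, pvIdx_find?]
      unfold pvCand
      cases hf : ((List.range k).reverse).find? (fun j => decide (a.getD j 0 < a.getD k 0)) with
      | none =>
        rw [hf] at hh
        rw [List.head?_eq_none_iff.mp hh]
        rfl
      | some j =>
        rw [hf] at hh
        have hj : j < k := by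
          have := List.mem_of_find?_eq_some hf
          simp at this
          exact this
        obtain ⟨rest, hrest⟩ : ∃ rest,
            (pvIdx a k).dropWhile (fun j => decide (a.getD k 0 ≤ a.getD j 0)) = j :: rest := by
          cases hd : (pvIdx a k).dropWhile (fun j => decide (a.getD k 0 ≤ a.getD j 0)) with
          | nil => rw [hd] at hh; simp at hh
          | cons y ys => rw [hd] at hh; simp at hh; exact ⟨ys, by rw [hh]⟩
        rw [hrest, List.map_cons]
        show (1 : Int) + pvDp a j = 1 + (pvTab a k).getD j 0
        rw [pvTab_getD a hj]
    rw [hcand]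
    have hdp :
        (match (if k = 0 then none else some (pvDp a (k-1))) with
          | none => pvCand a (pvTab a k) k
          | some p => max p (pvCand a (pvTab a k) k)) = pvDp a k := by
      rcases Nat.eq_zero_or_pos k with hk0 | hk1
      · subst hk0
        simp [pvDp_zero, pvCand]
      · rw [if_neg (by omega)]
        show max (pvDp a (k-1)) (pvCand a (pvTab a k) k) = pvDp a k
        rw [pvDp_eq a k, pvTab_getD a (show k - 1 < k by omega)]
    rw [hdp]
    simp [pvIdx]

theorem b_result (a : List Int) (h : a ≠ []) :
    find_sub_max_length_alt a = pvDp a (a.length - 1) := by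
  have hn : 1 ≤ a.length := List.length_pos_iff.mpr h
  unfold find_sub_max_length_alt
  have hb := b_inv a a.length (le_refl _)
  rw [List.take_length] at hb
  rw [hb, if_neg (by omega)]

-- ===== VERDICT (by name: the statement is the Claim_ definition above) =====
theorem find_sub_max_length_spec : Claim_equal_find_sub_max_length := by
  intro l _ hpre
  unfold Spec_find_sub_max_length
  rw [a_result l hpre, b_result l hpre]
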